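-- pv_equiv track=rewrite | github.com/KeyMasterOfGozer/WordSearch | discord-bot.py | listWords
-- ===== SOURCE A (Python) =====
-- def listWords(WordList:list):
--     retstr=''
--     i=1
--     for word in WordList:
--         if i%5!=1: retstr=retstr+" "
--         retstr=retstr+word
--         if i%5==0: retstr=retstr+"\n"
--         i+=1
--     return retstr
-- ===== SOURCE B (Python) =====
-- def listWords(WordList: list):
--     groups = [WordList[j:j+5] for j in range(0, len(WordList), 5)]
--     return ''.join(' '.join(g) + ('\n' if len(g) == 5 else '') for g in groups)
-- ===== Notes on version B (the rewrite author's own statement) =====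
-- stated objective: simpler
-- what changed: Replaces the per-word modular-counter string accumulation with slicing the list into groups of five and joining each group with spaces (newline appended only to full groups).
import Mathlib
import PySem

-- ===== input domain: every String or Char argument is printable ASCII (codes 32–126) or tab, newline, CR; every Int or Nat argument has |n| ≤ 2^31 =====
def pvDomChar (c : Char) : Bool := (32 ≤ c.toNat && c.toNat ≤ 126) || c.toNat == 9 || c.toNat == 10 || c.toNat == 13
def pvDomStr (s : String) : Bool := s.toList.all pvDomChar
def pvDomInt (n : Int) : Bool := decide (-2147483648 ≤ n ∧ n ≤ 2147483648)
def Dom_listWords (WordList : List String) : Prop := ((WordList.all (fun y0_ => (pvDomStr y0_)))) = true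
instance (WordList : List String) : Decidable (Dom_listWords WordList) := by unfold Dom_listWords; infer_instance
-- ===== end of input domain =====

-- B replaces A's modular-counter string accumulation with slicing into groups of five and joining; objective: simpler.

-- ===== PORT A =====
-- A's for-loop over words, carrying (retstr, i) exactly as the Python does.
def listWordsLoop (retstr : String) (i : Int) (ws : List String) : String :=
  match ws with
  | [] => retstr
  | word :: rest =>
    let r1 := if PySem.Int.mod i 5 ≠ 1 then retstr ++ " " else retstr
    let r2 := r1 ++ word
    let r3 := if PySem.Int.mod i 5 = 0 then r2 ++ "\n" else r2
    listWordsLoop r3 (i + 1) rest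

def listWords (WordList : List String) : String := listWordsLoop "" 1 WordList

-- ===== PORT B =====
-- the slices WordList[j:j+5] for j = 0, 5, 10, … : successive groups of five
def chunks5 (ws : List String) : List (List String) :=
  match ws with
  | [] => []
  | w :: t => (w :: t.take 4) :: chunks5 (t.drop 4)
termination_by ws.length
decreasing_by simp

def listWords_alt (WordList : List String) : String :=
  PySem.Str.join "" ((chunks5 WordList).map (fun g =>
    PySem.Str.join " " g ++ (if g.length = 5 then "\n" else "")))

-- ===== PRECONDITION & SPEC =====
def Spec_listWords (WordList : List String) (out : String) : Prop := out = listWords_alt WordList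
instance (WordList : List String) (out : String) : Decidable (Spec_listWords WordList out) := by unfold Spec_listWords; infer_instance

-- ===== CLAIM (what is proved, stated in full; the proofs are below) =====
def Claim_equal_listWords : Prop := ∀ (WordList : List String), Dom_listWords WordList → Spec_listWords WordList (listWords WordList)

-- ===== LEMMAS AND PROOFS =====

theorem chunks5_nil : chunks5 [] = [] := by rw [chunks5.eq_def]

theorem chunks5_cons (w : String) (t : List String) :
    chunks5 (w :: t) = (w :: t.take 4) :: chunks5 (t.drop 4) := by
  rw [chunks5.eq_def]

theorem flatten_intersperse_nil {α : Type} (l : List (List α)) :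
    (List.intersperse ([] : List α) l).flatten = l.flatten := by
  induction l with
  | nil => rfl
  | cons x r ih =>
    cases r with
    | nil => rfl
    | cons y s => simp_all [List.intersperse]

-- A's loop only looks at the counter i through i % 5
theorem listWordsLoop_mod (ws : List String) : ∀ (acc : String) (i j : Int),
    PySem.Int.mod i 5 = PySem.Int.mod j 5 → listWordsLoop acc i ws = listWordsLoop acc j ws := by
  induction ws with
  | nil => intro acc i j _; rfl
  | cons w t ih =>
    intro acc i j h
    simp only [listWordsLoop, h]
    apply ih
    simp only [PySem.Int.mod_eq_emod_of_pos (show (0:Int) < 5 by norm_num)] at h ⊢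
    omega

theorem listWordsLoop_eq_alt (n : Nat) : ∀ (ws : List String), ws.length ≤ n →
    ∀ (acc : String), (listWordsLoop acc 1 ws).toList = acc.toList ++ (listWords_alt ws).toList := by
  induction n with
  | zero =>
    intro ws h acc
    match ws with
    | [] => simp [listWordsLoop, listWords_alt, chunks5_nil, PySem.Str.toList_join,
        PySem.Chars.join, List.intercalate]
  | succ n ih =>
    intro ws h acc
    match ws with
    | [] => simp [listWordsLoop, listWords_alt, chunks5_nil, PySem.Str.toList_join,
        PySem.Chars.join, List.intercalate]
    | [a] => simp [listWordsLoop, listWords_alt, chunks5_nil, chunks5_cons, PySem.Int.mod,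
        PySem.Str.toList_join, PySem.Chars.join, List.intercalate, String.toList_append]
    | [a, b] => simp [listWordsLoop, listWords_alt, chunks5_nil, chunks5_cons, PySem.Int.mod,
        PySem.Str.toList_join, PySem.Chars.join, List.intercalate, String.toList_append]
    | [a, b, c] => simp [listWordsLoop, listWords_alt, chunks5_nil, chunks5_cons, PySem.Int.mod,
        PySem.Str.toList_join, PySem.Chars.join, List.intercalate, String.toList_append]
    | [a, b, c, d] => simp [listWordsLoop, listWords_alt, chunks5_nil, chunks5_cons, PySem.Int.mod,
        PySem.Str.toList_join, PySem.Chars.join, List.intercalate, String.toList_append]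
    | a :: b :: c :: d :: e :: t =>
      have h5 : listWordsLoop acc 1 (a :: b :: c :: d :: e :: t)
          = listWordsLoop (acc ++ a ++ " " ++ b ++ " " ++ c ++ " " ++ d ++ " " ++ e ++ "\n") 6 t := by
        simp [listWordsLoop, PySem.Int.mod]
      rw [h5, listWordsLoop_mod t _ 6 1 (by simp [PySem.Int.mod]),
        ih t (by simp at h ⊢; omega)]
      simp [listWords_alt, chunks5_cons, PySem.Str.toList_join, flatten_intersperse_nil,
        PySem.Chars.join, List.intercalate, String.toList_append]

-- ===== VERDICT (by name: the statement is the Claim_ definition above) =====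
theorem listWords_spec : Claim_equal_listWords := by
  intro ws _
  unfold Spec_listWords listWords
  rw [← String.toList_inj, listWordsLoop_eq_alt ws.length ws le_rfl ""]
  simp
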